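-- pv_equiv track=rewrite | github.com/yanghh0/Dialogue | test/2fsk.py | CalCrcOneByte
-- ===== SOURCE A (Python) =====
-- def CalCrcOneByte(abyte):
--     crc_1byte = 0
--     for i in range(8):
--         if (crc_1byte ^ abyte) & 0x01:
--             crc_1byte = crc_1byte ^ 0x18
--             crc_1byte = crc_1byte >> 1
--             crc_1byte = crc_1byte | 0x80
--         else:
--             crc_1byte = crc_1byte >> 1
--         abyte = abyte >> 1
--     return crc_1byte
-- ===== SOURCE B (Python) =====
-- # CRC-8 (poly 0x8C reflected) of one byte via a precomputed 256-entry table.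
-- # The original bit loop only ever depends on the low 8 bits of abyte, so
-- # TABLE[abyte % 256] reproduces it for every int (Python % yields 0..255).
--
-- _CRC8_TABLE = (
--     0, 94, 188, 226, 97, 63, 221, 131, 194, 156, 126, 32, 163, 253, 31, 65,
--     157, 195, 33, 127, 252, 162, 64, 30, 95, 1, 227, 189, 62, 96, 130, 220,
--     35, 125, 159, 193, 66, 28, 254, 160, 225, 191, 93, 3, 128, 222, 60, 98,
--     190, 224, 2, 92, 223, 129, 99, 61, 124, 34, 192, 158, 29, 67, 161, 255,
--     70, 24, 250, 164, 39, 121, 155, 197, 132, 218, 56, 102, 229, 187, 89, 7,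
--     219, 133, 103, 57, 186, 228, 6, 88, 25, 71, 165, 251, 120, 38, 196, 154,
--     101, 59, 217, 135, 4, 90, 184, 230, 167, 249, 27, 69, 198, 152, 122, 36,
--     248, 166, 68, 26, 153, 199, 37, 123, 58, 100, 134, 216, 91, 5, 231, 185,
--     140, 210, 48, 110, 237, 179, 81, 15, 78, 16, 242, 172, 47, 113, 147, 205,
--     17, 79, 173, 243, 112, 46, 204, 146, 211, 141, 111, 49, 178, 236, 14, 80,
--     175, 241, 19, 77, 206, 144, 114, 44, 109, 51, 209, 143, 12, 82, 176, 238,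
--     50, 108, 142, 208, 83, 13, 239, 177, 240, 174, 76, 18, 145, 207, 45, 115,
--     202, 148, 118, 40, 171, 245, 23, 73, 8, 86, 180, 234, 105, 55, 213, 139,
--     87, 9, 235, 181, 54, 104, 138, 212, 149, 203, 41, 119, 244, 170, 72, 22,
--     233, 183, 85, 11, 136, 214, 52, 106, 43, 117, 151, 201, 74, 20, 246, 168,
--     116, 42, 200, 150, 21, 75, 169, 247, 182, 232, 10, 84, 215, 137, 107, 53
-- )
--
--
-- def CalCrcOneByte(abyte):
--     return _CRC8_TABLE[abyte % 256]
-- ===== Notes on version B (the rewrite author's own statement) =====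
-- stated objective: idiomatic
-- what changed: B replaces A's per-call 8-iteration xor/shift bit loop by a single lookup in a precomputed 256-entry CRC-8 table indexed by the low byte of abyte, the standard way CRC-8 is implemented.
import Mathlib
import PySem

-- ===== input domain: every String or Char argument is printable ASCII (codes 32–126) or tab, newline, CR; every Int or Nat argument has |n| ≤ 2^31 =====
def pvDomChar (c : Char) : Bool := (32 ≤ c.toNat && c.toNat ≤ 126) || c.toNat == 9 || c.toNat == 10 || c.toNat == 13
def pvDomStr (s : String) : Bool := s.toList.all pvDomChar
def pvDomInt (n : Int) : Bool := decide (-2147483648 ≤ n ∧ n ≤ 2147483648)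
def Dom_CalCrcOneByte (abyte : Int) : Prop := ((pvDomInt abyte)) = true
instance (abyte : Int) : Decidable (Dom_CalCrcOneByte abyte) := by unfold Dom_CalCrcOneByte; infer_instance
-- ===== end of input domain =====

-- B replaces A's 8-iteration bit loop by a single lookup in a precomputed 256-entry
-- CRC-8 table indexed by abyte % 256 (which equals Python's abyte & 0xFF).

-- ===== PORT A =====
-- one iteration's update of crc_1byte (the if/else body of A's loop)
def crcNext (crc a : Int) : Int :=
  if PySem.Int.band (PySem.Int.bxor crc a) 1 ≠ 0 then
    PySem.Int.bor ((PySem.Int.bxor crc 24) >>> (1 : Nat)) 128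
  else
    crc >>> (1 : Nat)

def CalCrcOneByte (abyte : Int) : Int :=
  ((PySem.List.pyRange 0 8 1).foldl
    (fun (st : Int × Int) _ => (crcNext st.1 st.2, st.2 >>> (1 : Nat)))
    ((0 : Int), abyte)).1

-- ===== PORT B =====
-- the 256 CRC-8 values, a literal table (the same constant as in Source B)
def crc8Table : List Int := [
  0, 94, 188, 226, 97, 63, 221, 131, 194, 156, 126, 32, 163, 253, 31, 65,
  157, 195, 33, 127, 252, 162, 64, 30, 95, 1, 227, 189, 62, 96, 130, 220,
  35, 125, 159, 193, 66, 28, 254, 160, 225, 191, 93, 3, 128, 222, 60, 98,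
  190, 224, 2, 92, 223, 129, 99, 61, 124, 34, 192, 158, 29, 67, 161, 255,
  70, 24, 250, 164, 39, 121, 155, 197, 132, 218, 56, 102, 229, 187, 89, 7,
  219, 133, 103, 57, 186, 228, 6, 88, 25, 71, 165, 251, 120, 38, 196, 154,
  101, 59, 217, 135, 4, 90, 184, 230, 167, 249, 27, 69, 198, 152, 122, 36,
  248, 166, 68, 26, 153, 199, 37, 123, 58, 100, 134, 216, 91, 5, 231, 185,
  140, 210, 48, 110, 237, 179, 81, 15, 78, 16, 242, 172, 47, 113, 147, 205,
  17, 79, 173, 243, 112, 46, 204, 146, 211, 141, 111, 49, 178, 236, 14, 80,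
  175, 241, 19, 77, 206, 144, 114, 44, 109, 51, 209, 143, 12, 82, 176, 238,
  50, 108, 142, 208, 83, 13, 239, 177, 240, 174, 76, 18, 145, 207, 45, 115,
  202, 148, 118, 40, 171, 245, 23, 73, 8, 86, 180, 234, 105, 55, 213, 139,
  87, 9, 235, 181, 54, 104, 138, 212, 149, 203, 41, 119, 244, 170, 72, 22,
  233, 183, 85, 11, 136, 214, 52, 106, 43, 117, 151, 201, 74, 20, 246, 168,
  116, 42, 200, 150, 21, 75, 169, 247, 182, 232, 10, 84, 215, 137, 107, 53
]

def CalCrcOneByte_alt (abyte : Int) : Int :=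
  crc8Table.getD (PySem.Int.mod abyte 256).toNat 0

-- ===== PRECONDITION & SPEC =====
def Spec_CalCrcOneByte (abyte : Int) (out : Int) : Prop := out = CalCrcOneByte_alt abyte
instance (abyte : Int) (out : Int) : Decidable (Spec_CalCrcOneByte abyte out) := by unfold Spec_CalCrcOneByte; infer_instance

-- ===== CLAIM (what is proved, stated in full; the proofs are below) =====
def Claim_equal_CalCrcOneByte : Prop := ∀ (abyte : Int), Dom_CalCrcOneByte abyte → Spec_CalCrcOneByte abyte (CalCrcOneByte abyte)

-- ===== LEMMAS AND PROOFS =====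

-- proof-side recursion computing exactly A's loop state after n iterations
def loopN : Nat → Int → Int → Int × Int
  | 0, crc, a => (crc, a)
  | n + 1, crc, a => loopN n (crcNext crc a) (a >>> (1 : Nat))

theorem calA_eq_loopN (a : Int) : CalCrcOneByte a = (loopN 8 0 a).1 := by
  have h : PySem.List.pyRange 0 8 1 = [0, 1, 2, 3, 4, 5, 6, 7] := by decide
  simp [CalCrcOneByte, h, loopN]

-- xor has the parity of the sum
theorem bxor_mod_two (a b : Int) :
    PySem.Int.mod (PySem.Int.bxor a b) 2 = PySem.Int.mod (a + b) 2 := by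
  have e : ∀ x : Int, PySem.Int.mod x 2 = x % 2 := fun x =>
    PySem.Int.mod_eq_emod_of_pos (by omega)
  rw [e, e]
  unfold PySem.Int.bxor
  split_ifs with h1 h2 h2 <;>
    [ have h := @Nat.xor_mod_two_eq a.toNat b.toNat;
      have h := @Nat.xor_mod_two_eq a.toNat (-b - 1).toNat;
      have h := @Nat.xor_mod_two_eq (-a - 1).toNat b.toNat;
      have h := @Nat.xor_mod_two_eq (-a - 1).toNat (-b - 1).toNat ] <;>
    omega

theorem crcNext_congr (crc a b : Int) (h : a % 2 = b % 2) :
    crcNext crc a = crcNext crc b := by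
  have e : ∀ x : Int, PySem.Int.mod x 2 = x % 2 := fun x =>
    PySem.Int.mod_eq_emod_of_pos (by omega)
  have hc : PySem.Int.band (PySem.Int.bxor crc a) 1 =
      PySem.Int.band (PySem.Int.bxor crc b) 1 := by
    rw [PySem.Int.band_one, PySem.Int.band_one, bxor_mod_two, bxor_mod_two, e, e]
    omega
  simp [crcNext, hc]

theorem shiftRight_one (a : Int) : a >>> (1 : Nat) = a / 2 := by
  have := Int.shiftRight_eq_div_pow a 1
  simpa using this

-- halving preserves congruence: a ≡ b (mod 2k) → a/2 ≡ b/2 (mod k)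
theorem half_mod (k a b : Int) (h : a % (2 * k) = b % (2 * k)) :
    (a / 2) % k = (b / 2) % k := by
  have key : ∀ x : Int, (x / 2) % k = (x % (2 * k) / 2 + k * (x / (2 * k))) % k := by
    intro x
    have hx : x = x % (2 * k) + 2 * (k * (x / (2 * k))) := by
      have := Int.emod_add_mul_ediv x (2 * k); nlinarith [this]
    calc (x / 2) % k = ((x % (2 * k) + 2 * (k * (x / (2 * k)))) / 2) % k := by rw [← hx]
      _ = (x % (2 * k) / 2 + k * (x / (2 * k))) % k := by
            rw [Int.add_mul_ediv_left _ _ (by norm_num : (2:Int) ≠ 0)]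
  rw [key a, key b, Int.add_mul_emod_self_left, Int.add_mul_emod_self_left, h]

theorem loopN_congr : ∀ (n : Nat) (crc a b : Int),
    a % (2 ^ n : Int) = b % (2 ^ n : Int) → (loopN n crc a).1 = (loopN n crc b).1 := by
  intro n
  induction n with
  | zero => intro crc a b _; rfl
  | succ m ih =>
    intro crc a b h
    have h2 : a % 2 = b % 2 := by
      have d : (2 : Int) ∣ 2 ^ (m + 1) := dvd_pow_self 2 (Nat.succ_ne_zero m)
      calc a % 2 = a % 2 ^ (m + 1) % 2 := (Int.emod_emod_of_dvd a d).symm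
        _ = b % 2 ^ (m + 1) % 2 := by rw [h]
        _ = b % 2 := Int.emod_emod_of_dvd b d
    have hh : (a >>> (1 : Nat)) % (2 ^ m : Int) = (b >>> (1 : Nat)) % (2 ^ m : Int) := by
      rw [shiftRight_one, shiftRight_one]
      refine half_mod _ _ _ ?_
      have h21 : (2 : Int) * 2 ^ m = 2 ^ (m + 1) := by ring
      rw [h21]; exact h
    show (loopN m (crcNext crc a) (a >>> (1 : Nat))).1 =
         (loopN m (crcNext crc b) (b >>> (1 : Nat))).1
    rw [crcNext_congr crc a b h2]
    exact ih (crcNext crc b) _ _ hh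

-- the table agrees with A's loop on every residue 0..255
set_option maxRecDepth 4096 in
theorem table_correct : ∀ i : Fin 256, (loopN 8 0 (i.val : Int)).1 = crc8Table.getD i.val 0 := by
  decide

-- ===== VERDICT (by name: the statement is the Claim_ definition above) =====
theorem CalCrcOneByte_spec : Claim_equal_CalCrcOneByte := by
  intro a _
  unfold Spec_CalCrcOneByte CalCrcOneByte_alt
  rw [calA_eq_loopN]
  have hm : PySem.Int.mod a 256 = a % 256 :=
    PySem.Int.mod_eq_emod_of_pos (by omega)
  have hlt : a % 256 < 256 := Int.emod_lt_of_pos a (by omega)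
  have hge : 0 ≤ a % 256 := Int.emod_nonneg a (by omega)
  have hfin : (a % 256).toNat < 256 := by omega
  have hcong : (loopN 8 0 a).1 = (loopN 8 0 (a % 256)).1 := by
    apply loopN_congr
    norm_num [Int.emod_emod_of_dvd]
  have hc2 : a % 256 = (((a % 256).toNat : Nat) : Int) := by omega
  rw [hcong, hm, hc2]
  exact table_correct ⟨(a % 256).toNat, hfin⟩
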